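-- pv_equiv track=rewrite | github.com/little-isaac/scaler | intermediate/day_26/closest_minmax.py | solve
-- ===== SOURCE A (Python) =====
-- def solve(A):
--     n = len(A)
--     mini = min(A)
--     maxi = max(A)
--     if mini == maxi:
--         return 1
--     minIndex = -1
--     maxIndex = -1
--     ans = n
--     for i in range(n-1,-1,-1):
--         ele = A[i]
--         if ele == mini:
--             minIndex = i
--             if maxIndex != -1:
--                 length = maxIndex - minIndex + 1
--                 ans = min(ans,length)
--         elif ele == maxi:
--             maxIndex = i
--             if minIndex != -1:
--                 length = minIndex - maxIndex + 1
--                 ans = min(ans,length)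
--     return ans
-- ===== SOURCE B (Python) =====
-- def solve(A):
--     n = len(A)
--     mini = min(A)
--     maxi = max(A)
--     if mini == maxi:
--         return 1
--     events = [i for i, x in enumerate(A) if x == mini or x == maxi]
--     best = n
--     for i, j in zip(events, events[1:]):
--         if A[i] != A[j]:
--             best = min(best, j - i + 1)
--     return best
-- ===== Notes on version B (the rewrite author's own statement) =====
-- stated objective: alternative
-- what changed: A scans the list backwards tracking the nearest min-index and max-index seen so far and relaxing the answer at each extreme; B instead collects the positions of the two extreme values in one forward pass and takes the best adjacent pair with different values, since the optimal window is always bounded by two consecutive extreme positions.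
import Mathlib
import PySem

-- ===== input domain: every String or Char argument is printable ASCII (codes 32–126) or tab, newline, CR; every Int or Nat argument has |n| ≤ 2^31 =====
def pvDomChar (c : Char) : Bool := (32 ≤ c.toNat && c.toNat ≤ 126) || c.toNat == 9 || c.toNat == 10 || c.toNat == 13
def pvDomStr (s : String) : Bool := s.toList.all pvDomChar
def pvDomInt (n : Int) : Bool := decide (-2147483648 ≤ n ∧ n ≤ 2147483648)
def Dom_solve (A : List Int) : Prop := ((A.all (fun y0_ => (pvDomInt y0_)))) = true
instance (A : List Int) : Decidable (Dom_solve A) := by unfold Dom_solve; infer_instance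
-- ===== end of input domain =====

-- B rewrites A's backward nearest-opposite-index scan as: collect the indices of the
-- extremes in order and take the best adjacent pair with different values (objective: alternative).

-- ===== PORT A =====
-- loop body of A's backward scan; state = (minIndex, maxIndex, ans)
def solveStep (A : List Int) (mini maxi : Int) (st : Int × Int × Int) (i : Int) : Int × Int × Int :=
  let ele := PySem.List.pyGetD A i 0
  if ele = mini then
    if st.2.1 ≠ -1 then (i, st.2.1, min st.2.2 (st.2.1 - i + 1)) else (i, st.2.1, st.2.2)
  else if ele = maxi then
    if st.1 ≠ -1 then (st.1, i, min st.2.2 (st.1 - i + 1)) else (st.1, i, st.2.2)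
  else st

def solve (A : List Int) : Int :=
  let n : Int := A.length
  match PySem.List.min? A (fun x => x), PySem.List.max? A (fun x => x) with
  | some mini, some maxi =>
    if mini = maxi then 1
    else ((PySem.List.pyRange (n - 1) (-1) (-1)).foldl (solveStep A mini maxi) (-1, -1, n)).2.2
  | _, _ => 0

-- ===== PORT B =====
def solve_alt (A : List Int) : Int :=
  let n : Int := A.length
  match PySem.List.min? A (fun x => x) with
  | none => 0
  | some mini =>
    match PySem.List.max? A (fun x => x) with
    | none => 0
    | some maxi =>
      if mini = maxi then 1
      else
        let events := ((PySem.List.enumerate A 0).filter (fun p => p.2 == mini || p.2 == maxi)).map (fun p => p.1)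
        (events.zip events.tail).foldl
          (fun best p =>
            if PySem.List.pyGetD A p.1 0 ≠ PySem.List.pyGetD A p.2 0 then min best (p.2 - p.1 + 1) else best)
          n

-- ===== PRECONDITION & SPEC =====
-- Python's min/max raise ValueError on an empty list, so A returns only on nonempty input.
def Pre_solve (A : List Int) : Prop := A ≠ []
instance (A : List Int) : Decidable (Pre_solve A) := by unfold Pre_solve; infer_instance
def pvWitness_solve : List Int := [2, 1, 3, 1]

def Spec_solve (A : List Int) (out : Int) : Prop := out = solve_alt A
instance (A : List Int) (out : Int) : Decidable (Spec_solve A out) := by unfold Spec_solve; infer_instance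

-- ===== CLAIM (what is proved, stated in full; the proofs are below) =====
def Claim_equal_solve : Prop := ∀ (A : List Int), Dom_solve A → Pre_solve A → Spec_solve A (solve A)

-- ===== LEMMAS AND PROOFS =====

-- first index of the list, or -1 (what A's minIndex/maxIndex variables hold)
def FI (l : List Int) : Int := l.headD (-1)

-- indices (from s on) of the elements equal to v
def ids (v : Int) : List Int → Int → List Int
  | [], _ => []
  | x :: t, s => if x = v then s :: ids v t (s + 1) else ids v t (s + 1)

-- all pair-lengths |i-j|+1, i an index of mini, j an index of maxi
def pairsL (mini maxi : Int) (l : List Int) (s : Int) : List Int :=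
  (ids mini l s).flatMap (fun i => (ids maxi l s).map (fun j => |i - j| + 1))

-- labeled extreme positions
def evs (mini maxi : Int) : List (Int) → Int → List (Int × Int)
  | [], _ => []
  | x :: t, s => if x = mini ∨ x = maxi then (s, x) :: evs mini maxi t (s + 1) else evs mini maxi t (s + 1)

theorem mem_ids {v : Int} : ∀ {l : List Int} {s j : Int}, j ∈ ids v l s → s ≤ j ∧ j < s + l.length
  | [], s, j, h => by simp [ids] at h
  | x :: t, s, j, h => by
    simp only [ids] at h
    split at h
    · rcases List.mem_cons.mp h with h | h
      · subst h; simp only [List.length_cons]; omega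
      · have := mem_ids h; simp only [List.length_cons]; omega
    · have := mem_ids h; simp only [List.length_cons]; omega

theorem ids_head_le {v : Int} : ∀ {l : List Int} {s h : Int} {tl : List Int},
    ids v l s = h :: tl → ∀ j ∈ ids v l s, h ≤ j
  | [], s, h, tl, hh => by simp [ids] at hh
  | x :: t, s, h, tl, hh => by
    intro j hj
    by_cases hxv : x = v
    · simp only [ids, if_pos hxv] at hh hj
      obtain ⟨rfl, -⟩ : s = h ∧ ids v t (s + 1) = tl := by
        exact ⟨(List.cons.injEq _ _ _ _ ▸ hh).1, (List.cons.injEq _ _ _ _ ▸ hh).2⟩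
      rcases List.mem_cons.mp hj with h1 | h1
      · omega
      · have := (mem_ids h1).1
        omega
    · simp only [ids, if_neg hxv] at hh hj
      exact ids_head_le hh j hj

theorem foldl_min_le_init : ∀ (l : List Int) (a : Int), l.foldl min a ≤ a
  | [], a => le_refl a
  | x :: t, a => le_trans (foldl_min_le_init t (min a x)) (min_le_left a x)

theorem foldl_min_le_mem : ∀ {l : List Int} {x : Int} (a : Int), x ∈ l → l.foldl min a ≤ x
  | [], x, a, h => by simp at h
  | y :: t, x, a, h => by
    rcases List.mem_cons.mp h with h1 | h1
    · subst h1
      exact le_trans (foldl_min_le_init t (min a x)) (min_le_right a x)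
    · exact foldl_min_le_mem (min a y) h1

theorem foldl_min_cases : ∀ (l : List Int) (a : Int), l.foldl min a = a ∨ l.foldl min a ∈ l
  | [], a => Or.inl rfl
  | x :: t, a => by
    simp only [List.foldl_cons]
    rcases foldl_min_cases t (min a x) with h | h
    · rcases min_cases a x with ⟨h1, _⟩ | ⟨h1, _⟩
      · exact Or.inl (h.trans h1)
      · exact Or.inr (by rw [h, h1]; exact List.mem_cons_self)
    · exact Or.inr (List.mem_cons_of_mem _ h)

theorem foldl_min_const : ∀ {l : List Int} {b : Int}, (∀ y ∈ l, b ≤ y) → l.foldl min b = b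
  | [], b, _ => rfl
  | x :: t, b, h => by
    have hb : min b x = b := min_eq_left (h x List.mem_cons_self)
    simp only [List.foldl_cons, hb]
    exact foldl_min_const (fun y hy => h y (List.mem_cons_of_mem _ hy))

theorem foldl_min_min : ∀ (l : List Int) (a c : Int), l.foldl min (min a c) = min c (l.foldl min a)
  | [], a, c => min_comm a c
  | x :: t, a, c => by
    simp only [List.foldl_cons]
    rw [show min (min a c) x = min (min a x) c by
      rw [min_assoc, min_assoc, min_comm c x]]
    exact foldl_min_min t (min a x) c

theorem foldl_min_of_min_mem : ∀ {l : List Int} {c : Int} (a : Int),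
    (∀ y ∈ l, c ≤ y) → c ∈ l → l.foldl min a = min a c
  | [], c, a, _, hm => by simp at hm
  | x :: t, c, a, hle, hm => by
    simp only [List.foldl_cons]
    rcases List.mem_cons.mp hm with h1 | h1
    · subst h1
      rw [foldl_min_min t a c]
      rcases foldl_min_cases t a with h2 | h2
      · rw [h2, min_comm]
      · have hcF : c ≤ List.foldl min a t := hle _ (List.mem_cons_of_mem _ h2)
        have hFa : List.foldl min a t ≤ a := foldl_min_le_init t a
        omega
    · rw [foldl_min_of_min_mem (min a x) (fun y hy => hle y (List.mem_cons_of_mem _ hy)) h1]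
      have hcx : c ≤ x := hle x List.mem_cons_self
      rw [min_assoc, min_comm x c, min_eq_left hcx]

theorem foldl_min_perm {l l' : List Int} (h : l.Perm l') (a : Int) : l.foldl min a = l'.foldl min a := by
  induction h generalizing a with
  | nil => rfl
  | cons x _ ih => simp only [List.foldl_cons]; exact ih _
  | swap x y l => simp only [List.foldl_cons]; rw [min_assoc, min_comm y x, ← min_assoc]
  | trans _ _ ih1 ih2 => exact (ih1 a).trans (ih2 a)

theorem flatMap_cons_perm (L : List Int) (c : Int → Int) (m : Int → List Int) :
    (L.flatMap (fun i => c i :: m i)).Perm (L.map c ++ L.flatMap m) := by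
  induction L with
  | nil => simp
  | cons i r ih =>
    simp only [List.flatMap_cons, List.map_cons, List.cons_append]
    refine List.Perm.cons _ ?_
    refine (List.Perm.append_left (m i) ih).trans ?_
    rw [← List.append_assoc, ← List.append_assoc]
    exact List.Perm.append_right _ List.perm_append_comm

-- the minimum of the new pair-lengths contributed at index s is against the nearest opposite index
theorem foldl_min_new_pairs (s : Nat) (a0 h : Int) (tl rest : List Int)
    (hmem : h :: tl = rest) (hge : ∀ j ∈ rest, h ≤ j) (hlo : ∀ j ∈ rest, (s : Int) + 1 ≤ j) :
    List.foldl min a0 (rest.map (fun j => |(s : Int) - j| + 1)) = min a0 (h - (s : Int) + 1) := by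
  apply foldl_min_of_min_mem
  · intro y hy
    rcases List.mem_map.mp hy with ⟨j, hj, rfl⟩
    have h1 := hge j hj
    have h2 := hlo j hj
    rw [abs_of_nonpos (by omega)]
    omega
  · refine List.mem_map.mpr ⟨h, ?_, ?_⟩
    · rw [← hmem]; exact List.mem_cons_self
    · have h2 := hlo h (by rw [← hmem]; exact List.mem_cons_self)
      rw [abs_of_nonpos (by omega)]
      omega

theorem solve_step_inv (A : List Int) (mini maxi : Int) (hne : mini ≠ maxi) (x : Int) (t : List Int)
    (s : Nat) (a0 : Int) (hx : PySem.List.pyGetD A (s : Int) 0 = x) :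
    solveStep A mini maxi
      (FI (ids mini t ((s : Int) + 1)), FI (ids maxi t ((s : Int) + 1)),
        List.foldl min a0 (pairsL mini maxi t ((s : Int) + 1))) (s : Int)
    = (FI (ids mini (x :: t) (s : Int)), FI (ids maxi (x :: t) (s : Int)),
        List.foldl min a0 (pairsL mini maxi (x :: t) (s : Int))) := by
  simp only [solveStep, hx]
  by_cases hmin : x = mini
  · have hxmax : x ≠ maxi := fun h => hne (hmin.symm.trans h)
    have hidm : ids mini (x :: t) (s : Int) = (s : Int) :: ids mini t ((s : Int) + 1) := by
      simp [ids, hmin]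
    have hidM : ids maxi (x :: t) (s : Int) = ids maxi t ((s : Int) + 1) := by
      simp [ids, hxmax]
    rcases hM : ids maxi t ((s : Int) + 1) with _ | ⟨h, tl⟩
    · -- no max index yet: ans unchanged, both pair lists are empty
      simp only [if_pos hmin, hM, FI, List.headD, ne_eq, not_true_eq_false, hidm, hidM,
        pairsL, List.flatMap_cons, List.map_nil, List.nil_append]
      simp [List.flatMap]
    · have hmemM : ∀ j ∈ ids maxi t ((s : Int) + 1), (s : Int) + 1 ≤ j :=
        fun j hj => (mem_ids hj).1
      have hge := ids_head_le hM
      have hh1 : (s : Int) + 1 ≤ h := hmemM h (by rw [hM]; exact List.mem_cons_self)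
      have hcond : FI (h :: tl) ≠ -1 := by simp only [FI, List.headD]; omega
      simp only [if_pos hmin, hM, hidm, hidM, FI, List.headD]
      rw [if_pos (show h ≠ -1 by omega)]
      simp only [Prod.mk.injEq]
      refine ⟨trivial, trivial, ?_⟩
      simp only [pairsL, hidm, hidM, hM, List.flatMap_cons]
      rw [List.foldl_append]
      rw [foldl_min_new_pairs s a0 h tl (h :: tl) rfl (hM ▸ hge) (hM ▸ hmemM)]
      rw [foldl_min_min, min_comm]
  · by_cases hmax : x = maxi
    · have hidm : ids mini (x :: t) (s : Int) = ids mini t ((s : Int) + 1) := by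
        simp [ids, hmin]
      have hidM : ids maxi (x :: t) (s : Int) = (s : Int) :: ids maxi t ((s : Int) + 1) := by
        simp [ids, hmax]
      rcases hm : ids mini t ((s : Int) + 1) with _ | ⟨h, tl⟩
      · simp only [if_neg hmin, if_pos hmax, hm, FI, List.headD, ne_eq, not_true_eq_false, hidm, hidM, pairsL]
        simp [List.flatMap]
      · have hmemm : ∀ j ∈ ids mini t ((s : Int) + 1), (s : Int) + 1 ≤ j :=
          fun j hj => (mem_ids hj).1
        have hge := ids_head_le hm
        have hh1 : (s : Int) + 1 ≤ h := hmemm h (by rw [hm]; exact List.mem_cons_self)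
        have hcond : FI (h :: tl) ≠ -1 := by simp only [FI, List.headD]; omega
        simp only [if_neg hmin, if_pos hmax, hm, hidm, hidM, FI, List.headD]
        rw [if_pos (show h ≠ -1 by omega)]
        simp only [Prod.mk.injEq]
        refine ⟨trivial, trivial, ?_⟩
        simp only [pairsL, hidm, hidM, hm, List.map_cons]
        rw [foldl_min_perm (flatMap_cons_perm (h :: tl)
          (fun i => |i - (s : Int)| + 1) (fun i => (ids maxi t ((s : Int) + 1)).map (fun j => |i - j| + 1))) a0]
        rw [List.foldl_append]
        have : List.foldl min a0 ((h :: tl).map (fun i => |i - (s : Int)| + 1)) = min a0 (h - (s : Int) + 1) := by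
          apply foldl_min_of_min_mem
          · intro y hy
            rcases List.mem_map.mp hy with ⟨j, hj, rfl⟩
            have h1 := hge j (hm ▸ hj)
            have h2 := hmemm j (hm ▸ hj)
            rw [abs_of_nonneg (by omega)]
            omega
          · refine List.mem_map.mpr ⟨h, List.mem_cons_self, ?_⟩
            rw [abs_of_nonneg (by omega)]
        rw [this, foldl_min_min, min_comm]
    · have hidm : ids mini (x :: t) (s : Int) = ids mini t ((s : Int) + 1) := by
        simp [ids, hmin]
      have hidM : ids maxi (x :: t) (s : Int) = ids maxi t ((s : Int) + 1) := by
        simp [ids, hmax]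
      simp only [if_neg hmin, if_neg hmax, hidm, hidM, pairsL]

theorem solve_loop_inv (A : List Int) (mini maxi : Int) (hne : mini ≠ maxi) (a0 : Int) :
    ∀ (l : List Int) (s : Nat), A.drop s = l →
      (PySem.List.pyRange ((A.length : Int) - 1) ((s : Int) - 1) (-1)).foldl
          (solveStep A mini maxi) (-1, -1, a0)
      = (FI (ids mini l (s : Int)), FI (ids maxi l (s : Int)),
          List.foldl min a0 (pairsL mini maxi l (s : Int))) := by
  intro l
  induction l with
  | nil =>
    intro s hs
    have hlen : A.length ≤ s := by
      have := congrArg List.length hs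
      simp only [List.length_drop, List.length_nil] at this
      omega
    rw [PySem.List.pyRange_neg_one_eq_nil (by omega)]
    simp [ids, pairsL, FI]
  | cons x t ih =>
    intro s hs
    have hsl : s < A.length := by
      have := congrArg List.length hs
      simp only [List.length_drop, List.length_cons] at this
      omega
    have hdrop : A.drop (s + 1) = t := by
      have h1 : (A.drop s).drop 1 = A.drop (s + 1) := by
        rw [List.drop_drop]
      rw [← h1, hs, List.drop_one, List.tail_cons]
    have hget : PySem.List.pyGetD A (s : Int) 0 = x := by
      rw [PySem.List.pyGetD_natCast]
      have h0 : A[s]? = some x := by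
        have h1 : (A.drop s)[0]? = A[s + 0]? := List.getElem?_drop
        rw [hs] at h1
        simpa using h1.symm
      simp [List.getD_eq_getElem?_getD, h0]
    have hrange : PySem.List.pyRange ((A.length : Int) - 1) ((s : Int) - 1) (-1)
        = PySem.List.pyRange ((A.length : Int) - 1) (((s + 1 : Nat) : Int) - 1) (-1) ++ [(s : Int)] := by
      rw [PySem.List.pyRange_neg_one_eq_reverse, PySem.List.pyRange_neg_one_eq_reverse]
      push_cast
      rw [show (s : Int) - 1 + 1 = (s : Int) by ring, show (s : Int) + 1 - 1 + 1 = (s : Int) + 1 by ring,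
        show (A.length : Int) - 1 + 1 = (A.length : Int) by ring]
      rw [PySem.List.pyRange_one_cons (show (s : Int) < (A.length : Int) by omega)]
      rw [List.reverse_cons]
    rw [hrange, List.foldl_append, ih (s + 1) hdrop]
    simp only [List.foldl_cons, List.foldl_nil]
    have hstep := solve_step_inv A mini maxi hne x t s a0 hget
    push_cast at hstep ⊢
    rw [hstep]

theorem mem_evs' {mini maxi : Int} : ∀ {l : List Int} {s : Int} {p : Int × Int},
    p ∈ evs mini maxi l s → ∃ k : Nat, p.1 = s + k ∧ l[k]? = some p.2 ∧ (p.2 = mini ∨ p.2 = maxi)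
  | [], s, p, h => by simp [evs] at h
  | x :: t, s, p, h => by
    simp only [evs] at h
    split at h
    · rcases List.mem_cons.mp h with h1 | h1
      · subst h1
        exact ⟨0, by simp, by simpa using ‹x = mini ∨ x = maxi›⟩
      · obtain ⟨k, hk1, hk2, hk3⟩ := mem_evs' h1
        exact ⟨k + 1, by push_cast; omega, by simpa using hk2, hk3⟩
    · obtain ⟨k, hk1, hk2, hk3⟩ := mem_evs' h
      exact ⟨k + 1, by push_cast; omega, by simpa using hk2, hk3⟩

theorem evs_ge {mini maxi : Int} {l : List Int} {s : Int} {p : Int × Int}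
    (h : p ∈ evs mini maxi l s) : s ≤ p.1 := by
  obtain ⟨k, hk1, -, -⟩ := mem_evs' h
  omega

theorem evs_chain (mini maxi : Int) : ∀ (l : List Int) (s : Int),
    (evs mini maxi l s).IsChain (fun p q => p.1 < q.1)
  | [], s => List.isChain_nil
  | x :: t, s => by
    simp only [evs]
    split
    · refine List.isChain_cons.mpr ⟨?_, evs_chain mini maxi t (s + 1)⟩
      intro b hb
      have hbm : b ∈ evs mini maxi t (s + 1) := List.mem_of_mem_head? hb
      have := evs_ge hbm
      simp only
      omega
    · exact evs_chain mini maxi t (s + 1)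

theorem evs_ids {mini maxi v : Int} (hv : v = mini ∨ v = maxi) : ∀ (l : List Int) (s i : Int),
    ((i, v) ∈ evs mini maxi l s ↔ i ∈ ids v l s)
  | [], s, i => by simp [evs, ids]
  | x :: t, s, i => by
    have ih := evs_ids hv t (s + 1) i
    by_cases hx : x = mini ∨ x = maxi
    · have hevs : evs mini maxi (x :: t) s = (s, x) :: evs mini maxi t (s + 1) := by
        simp only [evs, if_pos hx]
      by_cases hxv : x = v
      · have hids : ids v (x :: t) s = s :: ids v t (s + 1) := by
          simp only [ids, if_pos hxv]
        rw [hevs, hids]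
        simp only [List.mem_cons, Prod.mk.injEq, ih]
        constructor
        · rintro (⟨rfl, -⟩ | h)
          · exact Or.inl rfl
          · exact Or.inr h
        · rintro (rfl | h)
          · exact Or.inl ⟨rfl, hxv.symm⟩
          · exact Or.inr h
      · have hids : ids v (x :: t) s = ids v t (s + 1) := by
          simp only [ids, if_neg hxv]
        rw [hevs, hids]
        simp only [List.mem_cons, Prod.mk.injEq, ih]
        constructor
        · rintro (⟨-, hvx⟩ | h)
          · exact absurd hvx.symm hxv
          · exact h
        · exact fun h => Or.inr h
    · have hxv : ¬ x = v := fun h => hx (h ▸ hv)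
      have hevs : evs mini maxi (x :: t) s = evs mini maxi t (s + 1) := by
        simp only [evs, if_neg hx]
      have hids : ids v (x :: t) s = ids v t (s + 1) := by
        simp only [ids, if_neg hxv]
      rw [hevs, hids]
      exact ih


theorem chain'_lt_of_mem {a : Int × Int} :
    ∀ {l : List (Int × Int)}, List.IsChain (fun p q => p.1 < q.1) (a :: l) →
      ∀ q ∈ l, a.1 < q.1
  | [], _, q, hq => by simp at hq
  | b :: l', h, q, hq => by
    have hab : a.1 < b.1 := (List.isChain_cons_cons.mp h).1
    have htl : List.IsChain (fun p q => p.1 < q.1) (b :: l') := (List.isChain_cons_cons.mp h).2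
    rcases List.mem_cons.mp hq with rfl | hq'
    · exact hab
    · exact lt_trans hab (chain'_lt_of_mem htl q hq')

theorem chain'_zip : ∀ {e : List (Int × Int)}, List.IsChain (fun p q => p.1 < q.1) e →
    ∀ pq ∈ e.zip e.tail, pq.1.1 < pq.2.1
  | [], _, pq, h => by simp at h
  | [a], _, pq, h => by simp at h
  | a :: b :: t, hc, pq, h => by
    simp only [List.tail_cons, List.zip_cons_cons] at h
    rcases List.mem_cons.mp h with rfl | h1
    · exact (List.isChain_cons_cons.mp hc).1
    · exact chain'_zip (List.isChain_cons_cons.mp hc).2 pq h1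


-- in a chain headed by a, any later element with a different label yields an adjacent differing pair
theorem find_change : ∀ (e : List (Int × Int)) (a : Int × Int),
    List.IsChain (fun p q => p.1 < q.1) (a :: e) →
    ∀ q ∈ e, q.2 ≠ a.2 →
      ∃ r u, (r, u) ∈ (a :: e).zip e ∧ r.2 ≠ u.2 ∧ a.1 ≤ r.1 ∧ u.1 ≤ q.1 ∧ r.1 < u.1
  | [], a, _, q, hq, _ => by simp at hq
  | b :: e', a, hc, q, hq, hlab => by
    by_cases hb : b.2 = a.2
    · have hqb : q ≠ b := fun h => hlab (h ▸ hb)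
      have hq' : q ∈ e' := by rcases List.mem_cons.mp hq with h | h; exact absurd h hqb; exact h
      obtain ⟨r, u, hm, h1, h2, h3, h4⟩ :=
        find_change e' b (List.isChain_cons_cons.mp hc).2 q hq' (by rw [hb]; exact hlab)
      refine ⟨r, u, ?_, h1, ?_, h3, h4⟩
      · simp only [List.zip_cons_cons]
        exact List.mem_cons_of_mem _ hm
      · have := (List.isChain_cons_cons.mp hc).1
        omega
    · refine ⟨a, b, ?_, fun h => hb h.symm, le_refl _, ?_, (List.isChain_cons_cons.mp hc).1⟩
      · simp [List.zip_cons_cons]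
      · rcases List.mem_cons.mp hq with rfl | h
        · exact le_refl _
        · exact le_of_lt (chain'_lt_of_mem (List.isChain_cons_cons.mp hc).2 q h)

theorem adj_pair : ∀ (e : List (Int × Int)),
    List.IsChain (fun p q => p.1 < q.1) e →
    ∀ p q, p ∈ e → q ∈ e → p.1 < q.1 → p.2 ≠ q.2 →
      ∃ r u, (r, u) ∈ e.zip e.tail ∧ r.2 ≠ u.2 ∧ p.1 ≤ r.1 ∧ u.1 ≤ q.1 ∧ r.1 < u.1
  | [], _, p, q, hp, _, _, _ => by simp at hp
  | a :: e', hc, p, q, hp, hq, hlt, hlab => by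
    rcases List.mem_cons.mp hp with rfl | hp'
    · have hq' : q ∈ e' := by
        rcases List.mem_cons.mp hq with rfl | h
        · omega
        · exact h
      exact find_change e' p hc q hq' (fun h => hlab h.symm)
    · have hq' : q ∈ e' := by
        rcases List.mem_cons.mp hq with rfl | h
        · have := chain'_lt_of_mem hc p hp'; omega
        · exact h
      obtain ⟨r, u, hm, h1, h2, h3, h4⟩ :=
        adj_pair e' hc.tail p q hp' hq' hlt hlab
      rcases he' : e' with _ | ⟨b, e''⟩
      · rw [he'] at hp'; simp at hp'
      · refine ⟨r, u, ?_, h1, h2, h3, h4⟩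
        rw [he'] at hm
        simp only [List.tail_cons, List.zip_cons_cons]
        exact List.mem_cons_of_mem _ hm

theorem foldlIf_le_init {α : Type} (P : α → Prop) [DecidablePred P] (g : α → Int) :
    ∀ (L : List α) (a : Int), L.foldl (fun b pq => if P pq then min b (g pq) else b) a ≤ a
  | [], a => le_refl a
  | x :: t, a => by
    simp only [List.foldl_cons]
    split
    · exact le_trans (foldlIf_le_init P g t _) (min_le_left _ _)
    · exact foldlIf_le_init P g t a

theorem foldlIf_mono {α : Type} (P : α → Prop) [DecidablePred P] (g : α → Int) :
    ∀ (L : List α) (a b : Int), a ≤ b →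
      L.foldl (fun b pq => if P pq then min b (g pq) else b) a
        ≤ L.foldl (fun b pq => if P pq then min b (g pq) else b) b
  | [], a, b, h => h
  | x :: t, a, b, h => by
    simp only [List.foldl_cons]
    split
    · exact foldlIf_mono P g t _ _ (by omega)
    · exact foldlIf_mono P g t a b h

theorem foldlIf_le_mem {α : Type} (P : α → Prop) [DecidablePred P] (g : α → Int) :
    ∀ {L : List α} {pq : α} (a : Int), pq ∈ L → P pq →
      L.foldl (fun b pq => if P pq then min b (g pq) else b) a ≤ g pq
  | [], pq, a, h, _ => by simp at h
  | x :: t, pq, a, h, hP => by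
    simp only [List.foldl_cons]
    rcases List.mem_cons.mp h with rfl | h1
    · rw [if_pos hP]
      exact le_trans (foldlIf_le_init P g t _) (min_le_right _ _)
    · split
      · exact foldlIf_le_mem P g _ h1 hP
      · exact foldlIf_le_mem P g _ h1 hP

theorem le_foldlIf {α : Type} (P : α → Prop) [DecidablePred P] (g : α → Int) :
    ∀ {L : List α} {c : Int} (a : Int), c ≤ a → (∀ pq ∈ L, P pq → c ≤ g pq) →
      c ≤ L.foldl (fun b pq => if P pq then min b (g pq) else b) a
  | [], c, a, h, _ => h
  | x :: t, c, a, h, hall => by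
    simp only [List.foldl_cons]
    split
    · refine le_foldlIf P g _ ?_ (fun pq hpq => hall pq (List.mem_cons_of_mem _ hpq))
      have := hall x List.mem_cons_self ‹P x›
      omega
    · exact le_foldlIf P g a h (fun pq hpq => hall pq (List.mem_cons_of_mem _ hpq))

theorem pair_mem_pairsL {mini maxi : Int} {A : List Int} {i j : Int}
    (hi : i ∈ ids mini A 0) (hj : j ∈ ids maxi A 0) : |i - j| + 1 ∈ pairsL mini maxi A 0 := by
  simp only [pairsL, List.mem_flatMap]
  exact ⟨i, hi, List.mem_map.mpr ⟨j, hj, rfl⟩⟩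

theorem ids_ne {mini maxi : Int} {A : List Int} {i j : Int} (hne : mini ≠ maxi)
    (hi : i ∈ ids mini A 0) (hj : j ∈ ids maxi A 0) : i ≠ j := by
  intro h
  obtain ⟨k, hk1, hk2, -⟩ := mem_evs' ((evs_ids (mini := mini) (maxi := maxi) (Or.inl rfl) A 0 i).mpr hi)
  obtain ⟨k', hk1', hk2', -⟩ := mem_evs' ((evs_ids (mini := mini) (maxi := maxi) (Or.inr rfl) A 0 j).mpr hj)
  have hkk : k = k' := by omega
  rw [hkk, hk2'] at hk2
  simp only [Option.some.injEq] at hk2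
  exact hne hk2.symm

-- B's adjacent-differing-pair fold computes the all-pairs minimum
theorem alt_fold_eq (A : List Int) (mini maxi : Int) (hne : mini ≠ maxi) :
    ((evs mini maxi A 0).zip (evs mini maxi A 0).tail).foldl
        (fun b pq => if pq.1.2 ≠ pq.2.2 then min b (pq.2.1 - pq.1.1 + 1) else b) (A.length : Int)
      = List.foldl min (A.length : Int) (pairsL mini maxi A 0) := by
  set E := evs mini maxi A 0 with hE
  have hchain := evs_chain mini maxi A 0
  apply le_antisymm
  · -- BV ≤ M
    set F := List.foldl min (A.length : Int) (pairsL mini maxi A 0) with hF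
    rcases foldl_min_cases (pairsL mini maxi A 0) (A.length : Int) with hM | hM
    all_goals rw [← hF] at hM
    · rw [hM]; exact foldlIf_le_init _ _ _ _
    · simp only [pairsL, List.mem_flatMap] at hM
      obtain ⟨i, hi, hmm⟩ := hM
      obtain ⟨j, hj, hval⟩ := List.mem_map.mp hmm
      have hij : i ≠ j := ids_ne hne hi hj
      have hpi : (i, mini) ∈ E := (evs_ids (Or.inl rfl) A 0 i).mpr hi
      have hpj : (j, maxi) ∈ E := (evs_ids (Or.inr rfl) A 0 j).mpr hj
      rcases lt_or_gt_of_ne hij with hlt | hlt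
      · obtain ⟨r, u, hm, h1, h2, h3, h4⟩ :=
          adj_pair E hchain (i, mini) (j, maxi) hpi hpj hlt hne
        have := foldlIf_le_mem (fun pq : (Int × Int) × Int × Int => pq.1.2 ≠ pq.2.2)
          (fun pq => pq.2.1 - pq.1.1 + 1) (A.length : Int) hm h1
        rw [← hval, abs_of_nonpos (by omega)]
        simp only at this h2 h3
        omega
      · obtain ⟨r, u, hm, h1, h2, h3, h4⟩ :=
          adj_pair E hchain (j, maxi) (i, mini) hpj hpi hlt (fun h => hne h.symm)
        have := foldlIf_le_mem (fun pq : (Int × Int) × Int × Int => pq.1.2 ≠ pq.2.2)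
          (fun pq => pq.2.1 - pq.1.1 + 1) (A.length : Int) hm h1
        rw [← hval, abs_of_nonneg (by omega)]
        simp only at this h2 h3
        omega
  · -- M ≤ BV
    refine le_foldlIf _ _ _ (foldl_min_le_init _ _) ?_
    rintro ⟨p, q⟩ hpq hlab
    have hpE : p ∈ E := (List.of_mem_zip hpq).1
    have hqE : q ∈ E := List.mem_of_mem_tail (List.of_mem_zip hpq).2
    have hlt : p.1 < q.1 := chain'_zip hchain _ hpq
    obtain ⟨-, -, -, hp2⟩ := mem_evs' hpE
    obtain ⟨-, -, -, hq2⟩ := mem_evs' hqE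
    simp only at hlab ⊢
    rcases hp2 with hp2 | hp2
    · have hq2' : q.2 = maxi := by
        rcases hq2 with h | h
        · exact absurd (hp2.trans h.symm) hlab
        · exact h
      have hpE' : (p.1, mini) ∈ E := by rw [← hp2, Prod.mk.eta]; exact hpE
      have hqE' : (q.1, maxi) ∈ E := by rw [← hq2', Prod.mk.eta]; exact hqE
      have hi := (evs_ids (Or.inl rfl) A 0 p.1).mp hpE'
      have hj := (evs_ids (Or.inr rfl) A 0 q.1).mp hqE'
      have hmem := pair_mem_pairsL hi hj
      have := foldl_min_le_mem (A.length : Int) hmem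
      rw [abs_of_nonpos (by omega)] at this
      omega
    · have hq2' : q.2 = mini := by
        rcases hq2 with h | h
        · exact h
        · exact absurd (hp2.trans h.symm) hlab
      have hpE' : (p.1, maxi) ∈ E := by rw [← hp2, Prod.mk.eta]; exact hpE
      have hqE' : (q.1, mini) ∈ E := by rw [← hq2', Prod.mk.eta]; exact hqE
      have hi := (evs_ids (Or.inl rfl) A 0 q.1).mp hqE'
      have hj := (evs_ids (Or.inr rfl) A 0 p.1).mp hpE'
      have hmem := pair_mem_pairsL hi hj
      have := foldl_min_le_mem (A.length : Int) hmem
      rw [abs_of_nonneg (by omega)] at this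
      omega

theorem filter_enumerate_eq_evs (mini maxi : Int) : ∀ (l : List Int) (s : Int),
    (PySem.List.enumerate l s).filter (fun p => p.2 == mini || p.2 == maxi) = evs mini maxi l s
  | [], s => by simp [PySem.List.enumerate_nil, evs]
  | x :: t, s => by
    rw [PySem.List.enumerate_cons]
    by_cases hx : x = mini ∨ x = maxi
    · rw [List.filter_cons_of_pos (by simpa using hx)]
      simp only [evs, if_pos hx]
      rw [filter_enumerate_eq_evs mini maxi t (s + 1)]
    · rw [List.filter_cons_of_neg (by simpa using hx)]
      simp only [evs, if_neg hx]
      exact filter_enumerate_eq_evs mini maxi t (s + 1)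

theorem evs_lookup {mini maxi : Int} {A : List Int} {p : Int × Int}
    (h : p ∈ evs mini maxi A 0) : PySem.List.pyGetD A p.1 0 = p.2 := by
  obtain ⟨k, hk1, hk2, -⟩ := mem_evs' h
  have : p.1 = (k : Int) := by omega
  rw [this, PySem.List.pyGetD_natCast]
  simp [List.getD_eq_getElem?_getD, hk2]

-- ===== VERDICT (by name: the statement is the Claim_ definition above) =====
theorem solve_spec : Claim_equal_solve := by
  intro A hdom hpre
  unfold Spec_solve solve solve_alt
  rcases hmini : PySem.List.min? A (fun x => x) with _ | mini
  · exact absurd ((PySem.List.min?_eq_none_iff A (fun x => x)).mp hmini) hpre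
  rcases hmaxi : PySem.List.max? A (fun x => x) with _ | maxi
  · exact absurd ((PySem.List.max?_eq_none_iff A (fun x => x)).mp hmaxi) hpre
  simp only
  by_cases heq : mini = maxi
  · rw [if_pos heq, if_pos heq]
  rw [if_neg heq, if_neg heq]
  -- A's side: the backward scan invariant at s = 0
  have hA := solve_loop_inv A mini maxi heq (A.length : Int) A 0 (by simp)
  norm_num at hA
  rw [hA]
  -- B's side
  rw [filter_enumerate_eq_evs]
  set E := evs mini maxi A 0 with hE
  have htail : (E.map (fun p => p.1)).tail = E.tail.map (fun p => p.1) := by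
    rcases E with _ | ⟨a, r⟩ <;> simp
  rw [htail, List.zip_map, List.foldl_map]
  have hcongr : ∀ (b : Int) (pq : (Int × Int) × Int × Int), pq ∈ E.zip E.tail →
      (if PySem.List.pyGetD A (Prod.map (fun p => p.1) (fun p => p.1) pq).1 0
          ≠ PySem.List.pyGetD A (Prod.map (fun p => p.1) (fun p => p.1) pq).2 0 then
        min b ((Prod.map (fun p => p.1) (fun p => p.1) pq).2 - (Prod.map (fun p => p.1) (fun p => p.1) pq).1 + 1)
      else b)
      = (if pq.1.2 ≠ pq.2.2 then min b (pq.2.1 - pq.1.1 + 1) else b) := by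
    rintro b ⟨p, q⟩ hpq
    have hpE : p ∈ E := (List.of_mem_zip hpq).1
    have hqE : q ∈ E := List.mem_of_mem_tail (List.of_mem_zip hpq).2
    simp only [Prod.map, evs_lookup hpE, evs_lookup hqE]
  show (FI (ids mini A 0), FI (ids maxi A 0),
      List.foldl min ((A.length : Int)) (pairsL mini maxi A 0)).2.2 = _
  rw [PySem.List.foldl_congr_mem (E.zip E.tail) _ _ ((A.length : Int)) hcongr]
  exact (alt_fold_eq A mini maxi heq).symm
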